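-- pv_equiv track=rewrite | github.com/RonGarok/WebMap | gen.py | root_host
-- ===== SOURCE A (Python) =====
-- def root_host(host):
--     if not host:
--         return ""
--     host = host.lower().strip('.')
--     if host == "ct.ws":
--         return "webmap.ct.ws"
--     if host.startswith("www."):
--         host = host[4:]
--
--     aliases = {
--         "twitter.com": "x.com",
--         "x.com": "x.com",
--         "fb.com": "facebook.com",
--         "facebook.com": "facebook.com",
--         "m.facebook.com": "facebook.com",
--     }
--     if host in aliases:
--         return aliases[host]
--
--     parts = host.split('.')
--     if len(parts) <= 2:
--         return host
--
--     suffixes = {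
--         "co.uk", "org.uk", "gov.uk", "ac.uk", "sch.uk",
--         "net.au", "com.au", "org.au", "gov.au", "edu.au",
--         "co.nz", "gov.nz", "ac.nz", "co.jp", "ne.jp",
--         "or.jp", "go.jp", "ac.jp", "co.za", "gov.za"
--     }
--
--     for suffix in suffixes:
--         if host.endswith('.' + suffix):
--             parts = host[:-len(suffix) - 1].split('.')
--             return '.'.join(parts[-1:] + suffix.split('.')) if parts else suffix
--
--     return '.'.join(parts[-2:])
-- ===== SOURCE B (Python) =====
-- def root_host(host):
--     if not host:
--         return ""
--     host = host.lower().strip('.')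
--     if host == "ct.ws":
--         return "webmap.ct.ws"
--     if host.startswith("www."):
--         host = host[4:]
--
--     aliases = {
--         "twitter.com": "x.com",
--         "x.com": "x.com",
--         "fb.com": "facebook.com",
--         "facebook.com": "facebook.com",
--         "m.facebook.com": "facebook.com",
--     }
--     if host in aliases:
--         return aliases[host]
--
--     parts = host.split('.')
--     if len(parts) <= 2:
--         return host
--
--     suffixes = {
--         "co.uk", "org.uk", "gov.uk", "ac.uk", "sch.uk",
--         "net.au", "com.au", "org.au", "gov.au", "edu.au",
--         "co.nz", "gov.nz", "ac.nz", "co.jp", "ne.jp",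
--         "or.jp", "go.jp", "ac.jp", "co.za", "gov.za"
--     }
--
--     candidate = '.'.join(parts[-2:])
--     if candidate in suffixes:
--         return '.'.join(parts[-3:])
--     return candidate
-- ===== Notes on version B (the rewrite author's own statement) =====
-- stated objective: idiomatic
-- what changed: The per-suffix endswith scan (20 string-suffix tests against the host) is replaced by one set-membership test of the candidate formed by joining the last two labels of the already-computed parts list, and the matched return is the direct join of the last three labels instead of re-slicing and re-splitting the host string.
import Mathlib
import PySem

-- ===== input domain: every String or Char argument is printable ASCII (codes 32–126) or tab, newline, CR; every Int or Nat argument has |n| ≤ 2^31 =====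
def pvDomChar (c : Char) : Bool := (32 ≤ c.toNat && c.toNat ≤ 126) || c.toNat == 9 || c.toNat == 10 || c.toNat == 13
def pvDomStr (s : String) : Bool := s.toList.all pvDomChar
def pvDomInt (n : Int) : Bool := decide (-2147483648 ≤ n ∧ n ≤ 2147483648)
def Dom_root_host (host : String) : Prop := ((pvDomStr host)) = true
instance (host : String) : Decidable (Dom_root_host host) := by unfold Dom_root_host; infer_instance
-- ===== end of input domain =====

-- B replaces A's per-suffix endswith scan by one set-membership test of the joined last two labels (idiomatic).

-- ===== PORT A =====
def pvAliases : PySem.Dict String String := PySem.Dict.ofList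
  [("twitter.com", "x.com"), ("x.com", "x.com"), ("fb.com", "facebook.com"),
   ("facebook.com", "facebook.com"), ("m.facebook.com", "facebook.com")]

def pvSuffixList : List String :=
  ["co.uk", "org.uk", "gov.uk", "ac.uk", "sch.uk",
   "net.au", "com.au", "org.au", "gov.au", "edu.au",
   "co.nz", "gov.nz", "ac.nz", "co.jp", "ne.jp",
   "or.jp", "go.jp", "ac.jp", "co.za", "gov.za"]

-- the 'for suffix in suffixes' loop; the base case is the return after the loop
def pvALoop (h : String) (parts : List String) : List String → String
  | [] => PySem.Str.join "." (PySem.List.slice parts (some (-2)) none)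
  | s :: rest =>
    if PySem.Str.endswith h ("." ++ s) then
      let parts2 := (PySem.Str.split? (PySem.Str.slice h none (some (-(PySem.Str.len s) - 1))) ".").getD []
      if parts2 ≠ [] then
        PySem.Str.join "." (PySem.List.slice parts2 (some (-1)) none ++ (PySem.Str.split? s ".").getD [])
      else s
    else pvALoop h parts rest

def root_host (host : String) : String :=
  if host = "" then ""
  else
    let h0 := PySem.Str.stripChars (PySem.Str.lower host) "."
    if h0 = "ct.ws" then "webmap.ct.ws"
    else
      let h := if PySem.Str.startswith h0 "www." then PySem.Str.slice h0 (some 4) none else h0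
      if PySem.Dict.contains pvAliases h then (PySem.Dict.get? pvAliases h).getD ""
      else
        let parts := (PySem.Str.split? h ".").getD []
        if parts.length ≤ 2 then h
        else pvALoop h parts pvSuffixList

-- ===== PORT B =====
def pvAliasesB : PySem.Dict String String := PySem.Dict.ofList
  [("twitter.com", "x.com"), ("x.com", "x.com"), ("fb.com", "facebook.com"),
   ("facebook.com", "facebook.com"), ("m.facebook.com", "facebook.com")]

def pvSuffixSetB : PySem.Set String := PySem.Set.ofList
  ["co.uk", "org.uk", "gov.uk", "ac.uk", "sch.uk",
   "net.au", "com.au", "org.au", "gov.au", "edu.au",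
   "co.nz", "gov.nz", "ac.nz", "co.jp", "ne.jp",
   "or.jp", "go.jp", "ac.jp", "co.za", "gov.za"]

def root_host_alt (host : String) : String :=
  if host = "" then ""
  else
    let h0 := PySem.Str.stripChars (PySem.Str.lower host) "."
    if h0 = "ct.ws" then "webmap.ct.ws"
    else
      let h := if PySem.Str.startswith h0 "www." then PySem.Str.slice h0 (some 4) none else h0
      if PySem.Dict.contains pvAliasesB h then (PySem.Dict.get? pvAliasesB h).getD ""
      else
        let parts := (PySem.Str.split? h ".").getD []
        if parts.length ≤ 2 then h
        else
          let cand := PySem.Str.join "." (PySem.List.slice parts (some (-2)) none)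
          if PySem.Set.contains pvSuffixSetB cand then
            PySem.Str.join "." (PySem.List.slice parts (some (-3)) none)
          else cand

-- ===== PRECONDITION & SPEC =====
def Spec_root_host (host : String) (out : String) : Prop := out = root_host_alt host
instance (host : String) (out : String) : Decidable (Spec_root_host host out) := by unfold Spec_root_host; infer_instance

-- ===== CLAIM (what is proved, stated in full; the proofs are below) =====
def Claim_equal_root_host : Prop := ∀ (host : String), Dom_root_host host → Spec_root_host host (root_host host)

-- ===== LEMMAS AND PROOFS =====

-- cons the chunk x onto the head piece of a split result
-- cons the chunk x onto the head piece of a split result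
def pvConsH (x : List Char) : List (List Char) → List (List Char)
  | [] => [x]
  | h :: t => (x ++ h) :: t

-- simple structural split on '.'
def pvSp : List Char → List (List Char)
  | [] => [[]]
  | c :: cs => if c = '.' then [] :: pvSp cs else pvConsH [c] (pvSp cs)

-- s is a two-label suffix "a.b"
def pvTL (s : String) : Prop := ∃ a b : List Char, s.toList = a ++ '.' :: b ∧ '.' ∉ a ∧ '.' ∉ b

theorem pvConsH_ne_nil (x : List Char) (ps : List (List Char)) : pvConsH x ps ≠ [] := by
  cases ps <;> simp [pvConsH]

theorem pvSp_ne_nil (cs : List Char) : pvSp cs ≠ [] := by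
  cases cs with
  | nil => simp [pvSp]
  | cons c cs =>
    simp only [pvSp]
    split
    · simp
    · exact pvConsH_ne_nil _ _

theorem pvConsH_append (x y : List Char) (ps : List (List Char)) :
    pvConsH (x ++ y) ps = pvConsH x (pvConsH y ps) := by
  cases ps <;> simp [pvConsH]

theorem pvGo_nil (fuel : Nat) (cur : List Char) (accs : List (List Char)) :
    PySem.Chars.splitOn.go ['.'] fuel [] cur accs = (cur.reverse :: accs).reverse := by
  cases fuel
  · rw [PySem.Chars.splitOn.go.eq_def]; simp
  · rw [PySem.Chars.splitOn.go.eq_def]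

theorem pvGo_cons (fuel : Nat) (c : Char) (rest cur : List Char) (accs : List (List Char)) :
    PySem.Chars.splitOn.go ['.'] (fuel + 1) (c :: rest) cur accs =
      (if ['.'].isPrefixOf (c :: rest) then
        PySem.Chars.splitOn.go ['.'] fuel (List.drop 1 (c :: rest)) [] (cur.reverse :: accs)
      else PySem.Chars.splitOn.go ['.'] fuel rest (c :: cur) accs) := by
  rw [PySem.Chars.splitOn.go.eq_def]; rfl

theorem pvSplitOn_go_eq : ∀ (fuel : Nat) (l cur : List Char) (accs : List (List Char)),
    l.length ≤ fuel →
    PySem.Chars.splitOn.go ['.'] fuel l cur accs = accs.reverse ++ pvConsH cur.reverse (pvSp l) := by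
  intro fuel
  induction fuel with
  | zero =>
    intro l cur accs hl
    have : l = [] := List.eq_nil_of_length_eq_zero (Nat.le_zero.mp hl)
    subst this
    simp [pvGo_nil, pvSp, pvConsH]
  | succ fuel ih =>
    intro l cur accs hl
    rcases l with _ | ⟨c, rest⟩
    · simp [pvGo_nil, pvSp, pvConsH]
    · rw [pvGo_cons]
      by_cases hc : c = '.'
      · subst hc
        rw [if_pos (by simp [List.isPrefixOf]), List.drop_one, List.tail_cons]
        rw [ih rest [] _ (by simpa using Nat.lt_succ_iff.mp (Nat.lt_of_lt_of_le (by simp) hl))]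
        rcases hs : pvSp rest with _ | ⟨p, ps⟩
        · exact absurd hs (pvSp_ne_nil rest)
        · simp [pvSp, pvConsH, hs]
      · rw [if_neg (by simp [List.isPrefixOf, Ne.symm hc])]
        rw [ih rest (c :: cur) accs (by simpa using Nat.lt_succ_iff.mp (Nat.lt_of_lt_of_le (by simp) hl))]
        have : pvSp (c :: rest) = pvConsH [c] (pvSp rest) := by simp [pvSp, hc]
        rw [this, List.reverse_cons, pvConsH_append]

theorem pvSplitOn_eq_sp (cs : List Char) : PySem.Chars.splitOn cs ['.'] = pvSp cs := by
  rw [PySem.Chars.splitOn, pvSplitOn_go_eq (cs.length + 1) cs [] [] (by omega)]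
  rcases h : pvSp cs with _ | ⟨p, ps⟩
  · exact absurd h (pvSp_ne_nil cs)
  · simp [pvConsH]

theorem pvSp_dotfree_append (x v : List Char) (hx : '.' ∉ x) :
    pvSp (x ++ v) = pvConsH x (pvSp v) := by
  induction x with
  | nil =>
    rcases hv : pvSp v with _ | ⟨p, ps⟩
    · exact absurd hv (pvSp_ne_nil v)
    · simp [pvConsH, hv]
  | cons c x ih =>
    have hc : c ≠ '.' := by rintro rfl; exact hx List.mem_cons_self
    have hx' : '.' ∉ x := fun h => hx (List.mem_cons_of_mem _ h)
    calc pvSp (c :: (x ++ v)) = pvConsH [c] (pvSp (x ++ v)) := by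
          simp [pvSp, hc]
      _ = pvConsH [c] (pvConsH x (pvSp v)) := by rw [ih hx']
      _ = pvConsH (c :: x) (pvSp v) := by rw [← pvConsH_append]; rfl

theorem pvSp_sep (x v : List Char) (hx : '.' ∉ x) :
    pvSp (x ++ '.' :: v) = x :: pvSp v := by
  rw [pvSp_dotfree_append x ('.' :: v) hx]
  have h1 : pvSp ('.' :: v) = [] :: pvSp v := by simp [pvSp]
  rw [h1]
  simp [pvConsH]

theorem pvSp_single (q : List Char) (hq : '.' ∉ q) : pvSp q = [q] := by
  rw [← List.append_nil q, pvSp_dotfree_append q [] hq]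
  simp [pvSp, pvConsH]

theorem pvSp_dotfree (cs : List Char) : ∀ p ∈ pvSp cs, '.' ∉ p := by
  induction cs with
  | nil => intro p hp; simp [pvSp] at hp; simp [hp]
  | cons c cs ih =>
    intro p hp
    simp only [pvSp] at hp
    by_cases hc : c = '.'
    · simp [hc] at hp
      rcases hp with rfl | hp
      · simp
      · exact ih p hp
    · rcases hs : pvSp cs with _ | ⟨q, qs⟩
      · exact absurd hs (pvSp_ne_nil cs)
      · rw [if_neg hc, hs] at hp
        simp [pvConsH] at hp
        rcases hp with rfl | hp
        · intro hmem
          rcases List.mem_cons.mp hmem with h | h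
          · exact hc h.symm
          · exact ih q (hs ▸ List.mem_cons_self) h
        · exact ih p (hs ▸ List.mem_cons_of_mem _ hp)

theorem pvIntercalate_consH (c : Char) (ps : List (List Char)) (hps : ps ≠ []) :
    List.intercalate ['.'] (pvConsH [c] ps) = c :: List.intercalate ['.'] ps := by
  rcases ps with _ | ⟨p, ps⟩
  · exact absurd rfl hps
  · rcases ps with _ | ⟨q, qs⟩
    · simp [pvConsH, List.intercalate]
    · simp [pvConsH, List.intercalate]

theorem pvIntercalate_sp (cs : List Char) : List.intercalate ['.'] (pvSp cs) = cs := by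
  induction cs with
  | nil => simp [pvSp, List.intercalate]
  | cons c cs ih =>
    by_cases hc : c = '.'
    · subst hc
      rcases hs : pvSp cs with _ | ⟨p, ps⟩
      · exact absurd hs (pvSp_ne_nil cs)
      · simp only [pvSp, hs]
        rw [hs] at ih
        simp [List.intercalate] at ih ⊢
        exact ih
    · simp only [pvSp, if_neg hc]
      rw [pvIntercalate_consH c _ (pvSp_ne_nil cs), ih]

theorem pvInter_snoc (ts : List (List Char)) (b : List Char) (hts : ts ≠ []) :
    List.intercalate ['.'] (ts ++ [b]) = List.intercalate ['.'] ts ++ '.' :: b := by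
  induction ts with
  | nil => exact absurd rfl hts
  | cons x ts ih =>
    rcases ts with _ | ⟨y, ts⟩
    · simp [List.intercalate]
    · have h2 := ih (by simp)
      simp [List.intercalate] at h2 ⊢
      simp [h2]

theorem pvSp_intercalate (qs : List (List Char)) (hq : qs ≠ []) (hdf : ∀ p ∈ qs, '.' ∉ p) :
    pvSp (List.intercalate ['.'] qs) = qs := by
  induction qs with
  | nil => exact absurd rfl hq
  | cons x qs ih =>
    have hx : '.' ∉ x := hdf x List.mem_cons_self
    rcases qs with _ | ⟨y, qs⟩
    · have h1 : List.intercalate ['.'] [x] = x := by simp [List.intercalate]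
      rw [h1, pvSp_single x hx]
    · have hI : List.intercalate ['.'] (x :: y :: qs) = x ++ '.' :: List.intercalate ['.'] (y :: qs) := by
        simp [List.intercalate]
      rw [hI, pvSp_sep _ _ hx, ih (by simp) (fun p hp => hdf p (List.mem_cons_of_mem _ hp))]

theorem pvDot_inj : ∀ (p a q b : List Char), '.' ∉ p → '.' ∉ a →
    p ++ '.' :: q = a ++ '.' :: b → p = a ∧ q = b := by
  intro p
  induction p with
  | nil =>
    intro a q b _ ha h
    rcases a with _ | ⟨a0, a'⟩
    · simpa using h
    · simp at h
      exact absurd (h.1 ▸ List.mem_cons_self) ha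
  | cons c p' ih =>
    intro a q b hp ha h
    rcases a with _ | ⟨a0, a'⟩
    · simp at h
      exact absurd (h.1 ▸ List.mem_cons_self) hp
    · simp at h
      obtain ⟨rfl, h2⟩ := h
      have := ih a' q b (fun hm => hp (List.mem_cons_of_mem _ hm)) (fun hm => ha (List.mem_cons_of_mem _ hm)) h2
      exact ⟨by rw [this.1], this.2⟩

theorem pvSuffix_cancel (u v w : List Char) (h : u ++ w <:+ v ++ w) : u <:+ v := by
  have h' := List.reverse_prefix.mpr h
  simp only [List.reverse_append] at h'
  exact List.reverse_prefix.mp ((List.prefix_append_right_inj w.reverse).mp h')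

theorem pvL3 (rs : List (List Char)) (a : List Char) (hr : rs ≠ [])
    (hdf : ∀ p ∈ rs, '.' ∉ p) (ha : '.' ∉ a) :
    ('.' :: a) <:+ List.intercalate ['.'] rs ↔ ∃ ts, ts ≠ [] ∧ rs = ts ++ [a] := by
  induction rs with
  | nil => exact absurd rfl hr
  | cons x rs' ih =>
    have hx : '.' ∉ x := hdf x List.mem_cons_self
    rcases rs' with _ | ⟨y, t⟩
    · have hI : List.intercalate ['.'] [x] = x := by simp [List.intercalate]
      rw [hI]
      constructor
      · intro h
        exact absurd (List.IsSuffix.mem List.mem_cons_self h) hx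
      · rintro ⟨ts, hts, he⟩
        rcases ts with _ | ⟨t0, ts'⟩
        · exact absurd rfl hts
        · simp at he
    · have hdf' : ∀ p ∈ y :: t, '.' ∉ p := fun p hp => hdf p (List.mem_cons_of_mem _ hp)
      have hI : List.intercalate ['.'] (x :: y :: t) = x ++ '.' :: List.intercalate ['.'] (y :: t) := by
        simp [List.intercalate]
      set I' := List.intercalate ['.'] (y :: t) with hI'
      have hA : (('.' :: a) <:+ x ++ '.' :: I') ↔ ('.' :: a) <:+ '.' :: I' := by
        constructor
        · intro h
          by_cases hlen : ('.' :: a).length ≤ ('.' :: I').length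
          · exact List.suffix_of_suffix_length_le h (List.suffix_append x _) hlen
          · exfalso
            have h2 : ('.' :: I') <:+ ('.' :: a) :=
              List.suffix_of_suffix_length_le (List.suffix_append x _) h (by omega)
            rcases List.suffix_cons_iff.mp h2 with he | hs
            · exact hlen (by rw [he])
            · exact ha (List.IsSuffix.mem List.mem_cons_self hs)
        · intro h
          exact h.trans (List.suffix_append x _)
      rw [hI, hA, List.suffix_cons_iff]
      constructor
      · rintro (he | hs)
        · have ha' : a = I' := by simpa using he
          rcases t with _ | ⟨z, t'⟩
          · refine ⟨[x], by simp, ?_⟩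
            have : I' = y := by simp [hI', List.intercalate]
            simp [ha', this]
          · exfalso
            have hdot : '.' ∈ I' := by
              rw [hI']
              simp [List.intercalate]
            exact ha (ha' ▸ hdot)
        · obtain ⟨ts, hts, he⟩ := (ih (by simp) hdf').mp hs
          exact ⟨x :: ts, by simp, by simp [he]⟩
      · rintro ⟨ts, hts, he⟩
        rcases ts with _ | ⟨t0, ts'⟩
        · exact absurd rfl hts
        · simp at he
          obtain ⟨rfl, he2⟩ := he
          rcases ts' with _ | ⟨u0, ts''⟩
          · simp at he2
            left
            have : I' = a := by simp [hI', he2.1, he2.2, List.intercalate]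
            rw [this]
          · right
            exact (ih (by simp) hdf').mpr ⟨u0 :: ts'', by simp, by simpa using he2⟩

theorem pvL2 (rs : List (List Char)) (a b : List Char) (hr : rs ≠ [])
    (hdf : ∀ p ∈ rs, '.' ∉ p) (ha : '.' ∉ a) (hb : '.' ∉ b) :
    ('.' :: (a ++ '.' :: b)) <:+ List.intercalate ['.'] rs ↔ ∃ ts, ts ≠ [] ∧ rs = ts ++ [a, b] := by
  have hsplit : ('.' :: (a ++ '.' :: b)) = ('.' :: a) ++ ('.' :: b) := by simp
  constructor
  · intro h
    have hb' : ('.' :: b) <:+ List.intercalate ['.'] rs :=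
      List.IsSuffix.trans (by rw [hsplit]; exact List.suffix_append _ _) h
    obtain ⟨ts, hts, rfl⟩ := (pvL3 rs b hr hdf hb).mp hb'
    rw [pvInter_snoc ts b hts, hsplit] at h
    have h2 : ('.' :: a) <:+ List.intercalate ['.'] ts := by
      refine pvSuffix_cancel _ _ ('.' :: b) ?_
      simpa using h
    obtain ⟨us, hus, rfl⟩ := (pvL3 ts a hts (fun p hp => hdf p (by simp [hp])) ha).mp h2
    exact ⟨us, hus, by simp⟩
  · rintro ⟨ts, hts, rfl⟩
    have h1 : List.intercalate ['.'] (ts ++ [a, b]) =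
        List.intercalate ['.'] ts ++ ('.' :: a) ++ ('.' :: b) := by
      have e : ts ++ [a, b] = (ts ++ [a]) ++ [b] := by simp
      rw [e, pvInter_snoc _ b (by simp [hts]), pvInter_snoc ts a hts]
    rw [h1, hsplit]
    simp [List.suffix_append, List.append_assoc]


theorem pvParts_eq (h : String) :
    (PySem.Str.split? h ".").getD [] = (pvSp h.toList).map String.ofList := by
  simp [PySem.Str.split?, PySem.Chars.split?, pvSplitOn_eq_sp]

theorem pvEndswith_iff (h s : String) :
    PySem.Str.endswith h ("." ++ s) = true ↔ ('.' :: s.toList) <:+ h.toList := by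
  rw [PySem.Str.endswith, PySem.Chars.endswith_iff]
  simp [String.toList_append]

theorem pvJoin_map (l : List (List Char)) :
    PySem.Str.join "." (l.map String.ofList) = String.ofList (List.intercalate ['.'] l) := by
  simp [PySem.Str.join, PySem.Chars.join, Function.comp_def]

theorem pvDecomp (ps : List (List Char)) (h : 2 < ps.length) :
    ∃ us x p q, ps = us ++ [x, p, q] := by
  rcases hv : ps.reverse with _ | ⟨q, rest⟩
  · rw [← List.length_reverse (as := ps), hv] at h; simp at h
  · rcases rest with _ | ⟨p, rest2⟩
    · rw [← List.length_reverse (as := ps), hv] at h; simp at h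
    · rcases rest2 with _ | ⟨x, us'⟩
      · rw [← List.length_reverse (as := ps), hv] at h; simp at h
      · refine ⟨us'.reverse, x, p, q, ?_⟩
        rw [← ps.reverse_reverse, hv]
        simp

theorem pvSlice2 (us : List (List Char)) (x p q : List Char) :
    PySem.Str.join "." (PySem.List.slice ((us ++ [x, p, q]).map String.ofList) (some (-2)) none) =
      String.ofList (p ++ '.' :: q) := by
  rw [PySem.List.slice_from_neg_ofNat _ 2 (by omega)]
  have h1 : (us ++ [x, p, q]).map String.ofList = (us ++ [x]).map String.ofList ++ [p, q].map String.ofList := by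
    simp
  have h2 : ((us ++ [x]).map String.ofList ++ [p, q].map String.ofList).length - 2 =
      ((us ++ [x]).map String.ofList).length := by simp
  rw [h1, h2, List.drop_left, pvJoin_map]
  simp [List.intercalate]

theorem pvSlice3 (us : List (List Char)) (x p q : List Char) :
    PySem.Str.join "." (PySem.List.slice ((us ++ [x, p, q]).map String.ofList) (some (-3)) none) =
      String.ofList (List.intercalate ['.'] [x, p, q]) := by
  rw [PySem.List.slice_from_neg_ofNat _ 3 (by omega)]
  have h1 : (us ++ [x, p, q]).map String.ofList = us.map String.ofList ++ [x, p, q].map String.ofList := by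
    simp
  have h2 : (us.map String.ofList ++ [x, p, q].map String.ofList).length - 3 =
      (us.map String.ofList).length := by simp
  rw [h1, h2, List.drop_left, pvJoin_map]

theorem pvMatch_iff (h : String) (qs : List (List Char)) (p q : List Char)
    (hps : pvSp h.toList = qs ++ [p, q]) (hqs : qs ≠ []) (s : String) (a b : List Char)
    (hsab : s.toList = a ++ '.' :: b) (ha : '.' ∉ a) (hb : '.' ∉ b) :
    (PySem.Str.endswith h ("." ++ s) = true) ↔ p ++ '.' :: q = s.toList := by
  have hpdf : '.' ∉ p := pvSp_dotfree h.toList p (hps ▸ by simp)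
  have hcs : h.toList = List.intercalate ['.'] (qs ++ [p, q]) := by
    rw [← hps, pvIntercalate_sp]
  rw [pvEndswith_iff, hsab, hcs,
    pvL2 (qs ++ [p, q]) a b (by simp) (fun r hr => pvSp_dotfree h.toList r (hps ▸ hr)) ha hb]
  constructor
  · rintro ⟨ts, hts, he⟩
    have hlen : qs.length = ts.length := by
      have := congrArg List.length he; simp at this; omega
    have h2 := (List.append_inj he hlen).2
    simp at h2
    rw [h2.1, h2.2]
  · intro he
    obtain ⟨rfl, rfl⟩ := pvDot_inj p a q b hpdf ha he
    exact ⟨qs, hqs, rfl⟩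

theorem pvAVal (h : String) (us : List (List Char)) (x p q : List Char)
    (hps : pvSp h.toList = (us ++ [x]) ++ [p, q]) (s : String)
    (hm : p ++ '.' :: q = s.toList) :
    (if ((PySem.Str.split? (PySem.Str.slice h none (some (-(PySem.Str.len s) - 1))) ".").getD []) ≠ [] then
      PySem.Str.join "."
        (PySem.List.slice ((PySem.Str.split? (PySem.Str.slice h none (some (-(PySem.Str.len s) - 1))) ".").getD [])
          (some (-1)) none ++ (PySem.Str.split? s ".").getD [])
    else s) = String.ofList (List.intercalate ['.'] [x, p, q]) := by
  have hdf : ∀ r ∈ (us ++ [x]) ++ [p, q], '.' ∉ r := fun r hr => pvSp_dotfree h.toList r (hps ▸ hr)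
  have hpdf : '.' ∉ p := hdf p (by simp)
  have hqdf : '.' ∉ q := hdf q (by simp)
  have hdfux : ∀ r ∈ us ++ [x], '.' ∉ r := fun r hr => hdf r (by
    rcases List.mem_append.mp hr with h' | h'
    · simp [h']
    · simp at h'; simp [h'])
  have hcs : h.toList = List.intercalate ['.'] (us ++ [x]) ++ '.' :: p ++ '.' :: q := by
    have e : (us ++ [x]) ++ [p, q] = ((us ++ [x]) ++ [p]) ++ [q] := by simp
    rw [← pvIntercalate_sp h.toList, hps, e,
      pvInter_snoc _ q (by simp), pvInter_snoc _ p (by simp)]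
  have hslen : s.toList.length = p.length + q.length + 1 := by
    rw [← hm]; simp; omega
  have hIlen : h.toList.length - (s.toList.length + 1) = (List.intercalate ['.'] (us ++ [x])).length := by
    rw [hcs, hslen]; simp; omega
  have hneg : -(PySem.Str.len s) - 1 = -((s.toList.length + 1 : Nat) : Int) := by
    simp [PySem.Str.len]
    omega
  have hsl : (PySem.Str.slice h none (some (-(PySem.Str.len s) - 1))).toList =
      List.intercalate ['.'] (us ++ [x]) := by
    rw [PySem.Str.slice, hneg, String.toList_ofList, PySem.Chars.slice_eq_listSlice,
      PySem.List.slice_to_neg_natCast _ _ (by omega), hIlen, hcs]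
    rw [List.append_assoc]
    exact List.take_left
  have hparts2 : ((PySem.Str.split? (PySem.Str.slice h none (some (-(PySem.Str.len s) - 1))) ".").getD [])
      = (us ++ [x]).map String.ofList := by
    rw [pvParts_eq, hsl, pvSp_intercalate _ (by simp) hdfux]
  rw [hparts2, if_pos (by simp)]
  have hsps : (PySem.Str.split? s ".").getD [] = [p, q].map String.ofList := by
    rw [pvParts_eq, ← hm, pvSp_sep _ _ hpdf, pvSp_single q hqdf]
  rw [hsps, PySem.List.slice_from_neg_one]
  have h1 : (us ++ [x]).map String.ofList = us.map String.ofList ++ [x].map String.ofList := by simp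
  have h2 : (us.map String.ofList ++ [x].map String.ofList).length - 1 = (us.map String.ofList).length := by
    simp
  rw [h1, h2, List.drop_left]
  have h3 : ([x].map String.ofList ++ [p, q].map String.ofList) = [x, p, q].map String.ofList := by simp
  rw [h3, pvJoin_map]

theorem pvSuffix_TL : ∀ s ∈ pvSuffixList, pvTL s := by
  intro s hs
  simp only [pvSuffixList, List.mem_cons, List.not_mem_nil, or_false] at hs
  rcases hs with rfl|rfl|rfl|rfl|rfl|rfl|rfl|rfl|rfl|rfl|rfl|rfl|rfl|rfl|rfl|rfl|rfl|rfl|rfl|rfl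
  · exact ⟨['c', 'o'], ['u', 'k'], by decide, by decide, by decide⟩
  · exact ⟨['o', 'r', 'g'], ['u', 'k'], by decide, by decide, by decide⟩
  · exact ⟨['g', 'o', 'v'], ['u', 'k'], by decide, by decide, by decide⟩
  · exact ⟨['a', 'c'], ['u', 'k'], by decide, by decide, by decide⟩
  · exact ⟨['s', 'c', 'h'], ['u', 'k'], by decide, by decide, by decide⟩
  · exact ⟨['n', 'e', 't'], ['a', 'u'], by decide, by decide, by decide⟩
  · exact ⟨['c', 'o', 'm'], ['a', 'u'], by decide, by decide, by decide⟩
  · exact ⟨['o', 'r', 'g'], ['a', 'u'], by decide, by decide, by decide⟩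
  · exact ⟨['g', 'o', 'v'], ['a', 'u'], by decide, by decide, by decide⟩
  · exact ⟨['e', 'd', 'u'], ['a', 'u'], by decide, by decide, by decide⟩
  · exact ⟨['c', 'o'], ['n', 'z'], by decide, by decide, by decide⟩
  · exact ⟨['g', 'o', 'v'], ['n', 'z'], by decide, by decide, by decide⟩
  · exact ⟨['a', 'c'], ['n', 'z'], by decide, by decide, by decide⟩
  · exact ⟨['c', 'o'], ['j', 'p'], by decide, by decide, by decide⟩
  · exact ⟨['n', 'e'], ['j', 'p'], by decide, by decide, by decide⟩
  · exact ⟨['o', 'r'], ['j', 'p'], by decide, by decide, by decide⟩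
  · exact ⟨['g', 'o'], ['j', 'p'], by decide, by decide, by decide⟩
  · exact ⟨['a', 'c'], ['j', 'p'], by decide, by decide, by decide⟩
  · exact ⟨['c', 'o'], ['z', 'a'], by decide, by decide, by decide⟩
  · exact ⟨['g', 'o', 'v'], ['z', 'a'], by decide, by decide, by decide⟩

theorem pvLoop (h : String) (us : List (List Char)) (x p q : List Char)
    (hps : pvSp h.toList = (us ++ [x]) ++ [p, q]) :
    ∀ L : List String, (∀ s ∈ L, pvTL s) →
    pvALoop h ((pvSp h.toList).map String.ofList) L =
      (if L.contains (String.ofList (p ++ '.' :: q)) then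
        String.ofList (List.intercalate ['.'] [x, p, q])
      else String.ofList (p ++ '.' :: q)) := by
  intro L
  induction L with
  | nil =>
    intro _
    rw [pvALoop, hps]
    have hx : (us ++ [x]) ++ [p, q] = us ++ [x, p, q] := by simp
    rw [hx, pvSlice2, if_neg (by simp)]
  | cons s L ih =>
    intro hTL
    obtain ⟨a, b, hsab, ha, hb⟩ := hTL s List.mem_cons_self
    rw [pvALoop]
    by_cases hend : PySem.Str.endswith h ("." ++ s) = true
    · rw [if_pos hend]
      have hpq : p ++ '.' :: q = s.toList :=
        (pvMatch_iff h (us ++ [x]) p q hps (by simp) s a b hsab ha hb).mp hend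
      have hof : String.ofList (p ++ '.' :: q) = s :=
        String.ext_iff.mpr (by rw [String.toList_ofList, hpq])
      have hcont : (s :: L).contains (String.ofList (p ++ '.' :: q)) = true := by
        rw [hof]; simp
      rw [hcont, if_pos rfl]
      exact pvAVal h us x p q hps s hpq
    · rw [if_neg hend]
      rw [ih (fun t ht => hTL t (List.mem_cons_of_mem _ ht))]
      have hne : String.ofList (p ++ '.' :: q) ≠ s := by
        intro he
        exact hend ((pvMatch_iff h (us ++ [x]) p q hps (by simp) s a b hsab ha hb).mpr
          (by rw [← he, String.toList_ofList]))
      have hbeq : (String.ofList (p ++ '.' :: q) == s) = false := beq_eq_false_iff_ne.mpr hne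
      have hcont : (s :: L).contains (String.ofList (p ++ '.' :: q)) =
          L.contains (String.ofList (p ++ '.' :: q)) := by
        rw [List.contains_cons, hbeq, Bool.false_or]
      rw [hcont]

theorem pvTail (h : String) (hn : ¬ ((PySem.Str.split? h ".").getD []).length ≤ 2) :
    pvALoop h ((PySem.Str.split? h ".").getD []) pvSuffixList =
      (if PySem.Set.contains pvSuffixSetB
          (PySem.Str.join "." (PySem.List.slice ((PySem.Str.split? h ".").getD []) (some (-2)) none)) then
        PySem.Str.join "." (PySem.List.slice ((PySem.Str.split? h ".").getD []) (some (-3)) none)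
      else PySem.Str.join "." (PySem.List.slice ((PySem.Str.split? h ".").getD []) (some (-2)) none)) := by
  rw [pvParts_eq] at hn ⊢
  have hlen : 2 < (pvSp h.toList).length := by
    simp at hn; simpa using hn
  obtain ⟨us, x, p, q, hps⟩ := pvDecomp _ hlen
  have hps' : pvSp h.toList = (us ++ [x]) ++ [p, q] := by rw [hps]; simp
  rw [pvLoop h us x p q hps' pvSuffixList pvSuffix_TL, hps, pvSlice2, pvSlice3]
  have hc : PySem.Set.contains pvSuffixSetB (String.ofList (p ++ '.' :: q)) =
      pvSuffixList.contains (String.ofList (p ++ '.' :: q)) := by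
    apply Bool.eq_iff_iff.mpr
    rw [PySem.Set.contains_iff]
    show _ ∈ PySem.Set.ofList pvSuffixList ↔ _
    rw [PySem.Set.mem_ofList]
    exact (List.contains_iff_mem).symm
  rw [hc]
-- ===== VERDICT (by name: the statement is the Claim_ definition above) =====
set_option maxHeartbeats 1600000 in
theorem root_host_spec : Claim_equal_root_host := by
  intro host _
  unfold Spec_root_host root_host root_host_alt
  by_cases h0 : host = ""
  · rw [if_pos h0, if_pos h0]
  · rw [if_neg h0, if_neg h0]
    by_cases hct : PySem.Str.stripChars (PySem.Str.lower host) "." = "ct.ws"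
    · rw [if_pos hct, if_pos hct]
    · rw [if_neg hct, if_neg hct]
      have hAB : pvAliasesB = pvAliases := rfl
      rw [hAB]
      generalize (if PySem.Str.startswith (PySem.Str.stripChars (PySem.Str.lower host) ".") "www." = true
        then PySem.Str.slice (PySem.Str.stripChars (PySem.Str.lower host) ".") (some 4) none
        else PySem.Str.stripChars (PySem.Str.lower host) ".") = h1
      by_cases hmem : PySem.Dict.contains pvAliases h1 = true
      · rw [if_pos hmem, if_pos hmem]
      · rw [if_neg hmem, if_neg hmem]
        by_cases hlen : ((PySem.Str.split? h1 ".").getD []).length ≤ 2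
        · rw [if_pos hlen, if_pos hlen]
        · rw [if_neg hlen, if_neg hlen]
          exact pvTail h1 hlen
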